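-- pv_equiv track=rewrite | github.com/makarty/edu-works | is/3practical/inf3.py | key_get_shifts
-- ===== SOURCE A (Python) =====
-- def key_get_shifts(alphabet: str, shifts: list) -> list:
--     probable_keys = []
--     for i in range(len(alphabet)):
--         key = alphabet[i]
--         for j in range(1, len(shifts)):
--             key += alphabet[i - shifts[j]]
--         probable_keys.append(key)
--     return probable_keys
-- ===== SOURCE B (Python) =====
-- def key_get_shifts(alphabet: str, shifts: list) -> list:
--     # Column-first: column 0 is the alphabet itself; column j (j>=1) is the
--     # alphabet shifted by shifts[j] (wrap-around via modulo); then transpose.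
--     n = len(alphabet)
--     cols = [list(alphabet)]
--     for s in shifts[1:]:
--         cols.append([alphabet[(i - s) % n] for i in range(n)])
--     return ["".join(col[i] for col in cols) for i in range(n)]
-- ===== Notes on version B (the rewrite author's own statement) =====
-- stated objective: alternative
-- what changed: B builds the key grid column-by-column (column 0 = the alphabet, column j = the alphabet shifted by shifts[j] with explicit modulo wrap-around) and then transposes, instead of A's row-by-row string accumulation via negative string indices.
import Mathlib
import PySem

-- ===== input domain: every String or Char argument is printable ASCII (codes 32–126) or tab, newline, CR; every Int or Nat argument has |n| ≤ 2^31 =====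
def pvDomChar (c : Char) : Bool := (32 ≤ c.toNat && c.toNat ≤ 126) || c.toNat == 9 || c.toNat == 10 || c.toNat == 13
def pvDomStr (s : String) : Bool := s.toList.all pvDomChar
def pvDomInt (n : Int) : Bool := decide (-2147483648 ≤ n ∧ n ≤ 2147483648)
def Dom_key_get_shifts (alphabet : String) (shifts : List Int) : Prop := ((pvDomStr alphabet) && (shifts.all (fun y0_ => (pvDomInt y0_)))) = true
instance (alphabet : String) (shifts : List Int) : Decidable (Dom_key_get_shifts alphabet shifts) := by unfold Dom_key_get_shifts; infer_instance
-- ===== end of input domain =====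

-- B builds the key grid column-by-column (modulo wrap-around) and transposes, instead of A's
-- row-by-row accumulation with negative string indices; same cost, different decomposition.

-- ===== PORT A =====
def key_get_shifts (alphabet : String) (shifts : List Int) : List String :=
  (PySem.List.pyRange 0 (alphabet.toList.length) 1).foldl
    (fun probable_keys i =>
      let key : List Char := ((PySem.List.pyGet? alphabet.toList i).map (fun c => [c])).getD []
      let key := (PySem.List.pyRange 1 (shifts.length) 1).foldl
        (fun key j =>
          key ++ ((PySem.List.pyGet? alphabet.toList
            (i - PySem.List.pyGetD shifts j 0)).map (fun c => [c])).getD [])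
        key
      probable_keys ++ [String.ofList key]) []

-- ===== PORT B =====
-- column j of the grid: the alphabet shifted by s with modulo wrap-around
def kgsColumn (cs : List Char) (s : Int) : List Char :=
  (List.range cs.length).map (fun i : Nat => cs.getD (PySem.Int.mod ((i : Int) - s) cs.length).toNat ' ')

def key_get_shifts_alt (alphabet : String) (shifts : List Int) : List String :=
  let cs := alphabet.toList
  let cols := (PySem.List.slice shifts (some 1) none).foldl
    (fun cols s => cols ++ [kgsColumn cs s]) [cs]
  (List.range cs.length).map (fun i => String.ofList (cols.map (fun col => col.getD i ' ')))

-- ===== PRECONDITION & SPEC =====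
-- Pre_ excludes exactly the inputs on which A raises IndexError: a nonempty alphabet with
-- some shifts[j] (j ≥ 1) outside [0, len(alphabet)], where alphabet[i - shifts[j]] is out of range.
def Pre_key_get_shifts (alphabet : String) (shifts : List Int) : Prop :=
  alphabet.toList = [] ∨ ∀ s ∈ shifts.tail, 0 ≤ s ∧ s ≤ (alphabet.toList.length : Int)
instance (alphabet : String) (shifts : List Int) : Decidable (Pre_key_get_shifts alphabet shifts) := by
  unfold Pre_key_get_shifts; infer_instance

def pvWitness_key_get_shifts : String × List Int := ("ab", [1, 2])

def Spec_key_get_shifts (alphabet : String) (shifts : List Int) (out : List String) : Prop := out = key_get_shifts_alt alphabet shifts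
instance (alphabet : String) (shifts : List Int) (out : List String) : Decidable (Spec_key_get_shifts alphabet shifts out) := by unfold Spec_key_get_shifts; infer_instance

-- ===== CLAIM (what is proved, stated in full; the proofs are below) =====
def Claim_equal_key_get_shifts : Prop := ∀ (alphabet : String) (shifts : List Int), Dom_key_get_shifts alphabet shifts → Pre_key_get_shifts alphabet shifts → Spec_key_get_shifts alphabet shifts (key_get_shifts alphabet shifts)


-- ===== LEMMAS AND PROOFS =====

-- Python's wrap-around index, as A uses it, agrees with B's modulo index when in range.
lemma pyGet_wrap (cs : List Char) (k : Int) (h1 : -(cs.length : Int) ≤ k) (h2 : k < (cs.length : Int)) :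
    PySem.List.pyGet? cs k = some (cs.getD (PySem.Int.mod k (cs.length : Int)).toNat ' ') := by
  have hn : 0 < (cs.length : Int) := by omega
  rw [PySem.Int.mod_eq_emod_of_pos hn]
  by_cases hk : 0 ≤ k
  · rw [PySem.List.pyGet?_eq_some_getElem cs hk h2, Int.emod_eq_of_lt hk h2]
    have hlt : k.toNat < cs.length := by omega
    simp [List.getD, List.getElem?_eq_getElem hlt]
  · rw [not_le] at hk
    have hm : k % (cs.length : Int) = k + cs.length := by
      rw [← Int.add_emod_right, Int.emod_eq_of_lt (by omega) (by omega)]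
    have hmk : 0 < (-k).toNat ∧ (-k).toNat ≤ cs.length := by omega
    have hkeq : k = -((((-k).toNat : Nat)) : Int) := by omega
    have hidx : cs.length - (-k).toNat < cs.length := by omega
    have htn : (k + (cs.length : Int)).toNat = cs.length - (-k).toNat := by omega
    rw [hm, hkeq, PySem.List.pyGet?_neg_natCast cs (-k).toNat hmk.1 hmk.2, ← hkeq, htn]
    simp [List.getD, List.getElem?_eq_getElem hidx]

lemma A_row_eq_B_row (cs : List Char) (tail : List Int) (k : Nat) (hk : k < cs.length)
    (hs : ∀ s ∈ tail, 0 ≤ s ∧ s ≤ (cs.length : Int)) :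
    ((PySem.List.pyGet? cs (k : Int)).map (fun c => [c])).getD [] ++
      tail.flatMap (fun s => ((PySem.List.pyGet? cs ((k : Int) - s)).map (fun c => [c])).getD []) =
    cs.getD k ' ' :: tail.map (fun s => (kgsColumn cs s).getD k ' ') := by
  have hhead : PySem.List.pyGet? cs (k : Int) = some cs[k] := by
    simp [PySem.List.pyGet?_natCast, List.getElem?_eq_getElem hk]
  rw [hhead]
  have hflat : tail.flatMap (fun s => ((PySem.List.pyGet? cs ((k : Int) - s)).map (fun c => [c])).getD [])
      = tail.map (fun s => (kgsColumn cs s).getD k ' ') := by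
    rw [List.flatMap_eq_foldl]
    rw [show (tail.map (fun s => (kgsColumn cs s).getD k ' ')) =
        [] ++ tail.map (fun s => (kgsColumn cs s).getD k ' ') from rfl,
      ← PySem.List.foldl_append_singleton_eq_map]
    apply PySem.List.foldl_congr_mem
    intro acc s hsmem
    have hb := hs s hsmem
    have hget := pyGet_wrap cs ((k : Int) - s) (by omega) (by omega)
    rw [hget]
    simp only [kgsColumn]
    rw [PySem.List.getD_map_range _ cs.length k ' ' hk]
    simp
  rw [hflat]
  simp [List.getD, List.getElem?_eq_getElem hk]

theorem key_get_shifts_spec : Claim_equal_key_get_shifts := by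
  intro alphabet shifts _ hpre
  unfold Spec_key_get_shifts key_get_shifts key_get_shifts_alt
  simp only [PySem.List.slice_from_one, PySem.List.foldl_append_singleton_eq_map,
    PySem.List.foldl_append_eq_flatMap, List.nil_append]
  rcases hpre with hnil | hs
  · simp [hnil]
  · set cs := alphabet.toList with hcs
    rw [PySem.List.pyRange_zero_nat cs.length, List.map_map]
    apply List.map_congr_left
    intro k hkmem
    have hk : k < cs.length := List.mem_range.mp hkmem
    -- rewrite the inner index loop: shifts[j] for j in 1..len(shifts) is shifts.tail
    have hinner : (PySem.List.pyRange 1 (shifts.length) 1).flatMap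
        (fun j => ((PySem.List.pyGet? cs ((k : Int) - PySem.List.pyGetD shifts j 0)).map (fun c => [c])).getD [])
        = shifts.tail.flatMap (fun s => ((PySem.List.pyGet? cs ((k : Int) - s)).map (fun c => [c])).getD []) := by
      rw [show shifts.tail = shifts.drop ((1 : Int)).toNat from by simp [List.drop_one],
        ← PySem.List.map_pyGetD_pyRange shifts 0 (by omega), List.flatMap_map,
        PySem.List.len_eq]
    simp only [Function.comp]
    rw [hinner, A_row_eq_B_row cs shifts.tail k hk hs]
    simp [List.map_map, Function.comp_def]
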